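-- pv_equiv track=rewrite | github.com/mvukic/advent-of-code | day_11/solution.py | RecursiveIncrement
-- ===== SOURCE A (Python) =====
-- def RecursiveIncrement(array,index):
-- 	if index == len(array):
-- 		return array
-- 	if array[index] == 'z':
-- 		array[index] = 'a'
-- 		return RecursiveIncrement(array,index+1)
-- 	else:
-- 		array[index] = chr(ord(array[index])+1)
-- 		return array
-- ===== SOURCE B (Python) =====
-- def RecursiveIncrement(array, index):
--     # Iterative carry: walk forward turning 'z' into 'a', then bump the stop cell.
--     while index != len(array) and array[index] == 'z':
--         array[index] = 'a'
--         index += 1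
--     if index != len(array):
--         array[index] = chr(ord(array[index]) + 1)
--     return array
-- ===== Notes on version B (the rewrite author's own statement) =====
-- stated objective: simpler
-- what changed: The recursive carry propagation (one stack frame per 'z') is replaced by a flat two-phase loop: a while-loop that rolls 'z' over to 'a' and advances, then a single post-loop increment of the stopping cell.
import Mathlib
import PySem

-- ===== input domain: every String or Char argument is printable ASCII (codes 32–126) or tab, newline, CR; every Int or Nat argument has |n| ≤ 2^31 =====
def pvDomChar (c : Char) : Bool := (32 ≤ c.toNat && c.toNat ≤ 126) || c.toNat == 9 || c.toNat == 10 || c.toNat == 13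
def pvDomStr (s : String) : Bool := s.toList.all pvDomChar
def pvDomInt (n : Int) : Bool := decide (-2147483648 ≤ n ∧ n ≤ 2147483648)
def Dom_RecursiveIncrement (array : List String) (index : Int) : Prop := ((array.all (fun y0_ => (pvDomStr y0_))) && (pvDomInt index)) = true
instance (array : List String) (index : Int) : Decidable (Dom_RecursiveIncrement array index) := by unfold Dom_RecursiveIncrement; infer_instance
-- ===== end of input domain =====

-- B replaces A's recursive carry propagation by a flat two-phase loop (carry sweep, then one increment); same values, no speed claim.
-- A mutates its list argument in place; the equivalence proved here is about the RETURN value only.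

-- ===== PORT A =====
-- hand port of chr(ord(s)+1): exact when s is a single ASCII char (other s raise TypeError in Python; excluded by Pre_)
def pvSucc (s : String) : String :=
  match s.toList with
  | [c] => String.ofList [Char.ofNat (c.toNat + 1)]
  | _ => s

def RecursiveIncrement (array : List String) (index : Int) : List String :=
  if index = (array.length : Int) then array
  else
    match hg : PySem.List.pyGet? array index with
    | none => array   -- Python raises IndexError here (outside Pre_)
    | some s =>
      if s == "z" then
        RecursiveIncrement (PySem.List.pySetD array index "a") (index + 1)
      else
        PySem.List.pySetD array index (pvSucc s)
termination_by ((array.length : Int) - index).toNat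
decreasing_by
  have h := (PySem.List.pyGet?_eq_none_iff (xs := array) (i := index))
  have hr : PySem.Raise.InRange array.length index := by
    by_contra hc
    rw [← h] at hc
    simp [hg] at hc
  simp only [PySem.Raise.InRange] at hr
  rw [PySem.List.length_pySetD]
  omega

-- ===== PORT B =====
-- the while-loop of Source B: returns the list and index after the carry sweep
def pvCarry (array : List String) (index : Int) : List String × Int :=
  if index ≠ (array.length : Int) ∧ PySem.List.pyGet? array index = some "z" then
    pvCarry (PySem.List.pySetD array index "a") (index + 1)
  else (array, index)
termination_by ((array.length : Int) - index).toNat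
decreasing_by
  rename_i h
  have hin : PySem.Raise.InRange array.length index := by
    have he := (PySem.List.pyGet?_eq_none_iff (xs := array) (i := index))
    by_contra hc
    rw [← he] at hc
    simp [h.2] at hc
  simp only [PySem.Raise.InRange] at hin
  rw [PySem.List.length_pySetD]
  omega

def RecursiveIncrement_alt (array : List String) (index : Int) : List String :=
  let p := pvCarry array index
  if p.2 = (p.1.length : Int) then p.1
  else
    match PySem.List.pyGet? p.1 p.2 with
    | none => p.1   -- Python raises IndexError here (outside Pre_)
    | some s => PySem.List.pySetD p.1 p.2 (pvSucc s)

-- ===== PRECONDITION & SPEC =====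
-- A raises (so Pre_ excludes): index out of range other than == len (IndexError), and inputs whose
-- carry walk stops on a string that is not a single character (ord raises TypeError); the walk from a
-- negative index wraps past index -1 to the front of the list, hence the two-segment condition.
def pvOkFrom (l : List String) : Bool :=
  match l.dropWhile (· == "z") with
  | [] => true
  | s :: _ => s.toList.length == 1

def Pre_RecursiveIncrement (array : List String) (index : Int) : Prop :=
  index = (array.length : Int) ∨
  (0 ≤ index ∧ index < (array.length : Int) ∧ pvOkFrom (array.drop index.toNat) = true) ∨
  (index < 0 ∧ -(array.length : Int) ≤ index ∧
    pvOkFrom (array.drop (index + array.length).toNat) = true ∧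
    ((array.drop (index + array.length).toNat).all (· == "z") = true →
      pvOkFrom (array.take (index + array.length).toNat) = true))
instance (array : List String) (index : Int) : Decidable (Pre_RecursiveIncrement array index) := by
  unfold Pre_RecursiveIncrement; infer_instance

def pvWitness_RecursiveIncrement : List String × Int := (["z", "a"], 0)

def Spec_RecursiveIncrement (array : List String) (index : Int) (out : List String) : Prop := out = RecursiveIncrement_alt array index
instance (array : List String) (index : Int) (out : List String) : Decidable (Spec_RecursiveIncrement array index out) := by unfold Spec_RecursiveIncrement; infer_instance

-- ===== CLAIM (what is proved, stated in full; the proofs are below) =====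
def Claim_equal_RecursiveIncrement : Prop := ∀ (array : List String) (index : Int), Dom_RecursiveIncrement array index → Pre_RecursiveIncrement array index → Spec_RecursiveIncrement array index (RecursiveIncrement array index)

-- ===== LEMMAS AND PROOFS =====

-- one carry step of B's sweep loop
theorem pvCarry_step (array : List String) (index : Int)
    (h1 : index ≠ (array.length : Int)) (h2 : PySem.List.pyGet? array index = some "z") :
    pvCarry array index = pvCarry (PySem.List.pySetD array index "a") (index + 1) := by
  rw [pvCarry]; simp [h1, h2]

theorem pvCarry_stop (array : List String) (index : Int)
    (h : ¬ (index ≠ (array.length : Int) ∧ PySem.List.pyGet? array index = some "z")) :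
    pvCarry array index = (array, index) := by
  rw [pvCarry]; simp only [h, if_false]

theorem alt_step (array : List String) (index : Int)
    (h1 : index ≠ (array.length : Int)) (h2 : PySem.List.pyGet? array index = some "z") :
    RecursiveIncrement_alt array index
      = RecursiveIncrement_alt (PySem.List.pySetD array index "a") (index + 1) := by
  unfold RecursiveIncrement_alt
  rw [pvCarry_step array index h1 h2]

theorem total_eq (array : List String) (index : Int) :
    RecursiveIncrement array index = RecursiveIncrement_alt array index := by
  fun_induction RecursiveIncrement array index with
  | case1 a =>
      unfold RecursiveIncrement_alt
      rw [pvCarry_stop a (a.length : Int) (by simp)]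
      simp
  | case2 a i h hg =>
      unfold RecursiveIncrement_alt
      rw [pvCarry_stop a i (by simp [hg])]
      simp [h, hg]
  | case3 a i h s hg hz ih =>
      rw [ih]
      have hs : s = "z" := by simpa using hz
      exact (alt_step a i h (hs ▸ hg)).symm
  | case4 a i h s hg hz =>
      unfold RecursiveIncrement_alt
      rw [pvCarry_stop a i (by rintro ⟨-, h2⟩; rw [hg] at h2; simp at h2; exact hz (by simp [h2]))]
      simp [h, hg]

-- ===== VERDICT (by name: the statement is the Claim_ definition above) =====
theorem RecursiveIncrement_spec : Claim_equal_RecursiveIncrement := by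
  intro array index _ _
  exact total_eq array index
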